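-- pv_equiv track=rewrite | github.com/ShutingSunSS/CIT5_Squarelotrons_Python | Squarelotrons.py | left_right_flip
-- ===== SOURCE A (Python) =====
-- from copy import deepcopy
--
-- def left_right_flip(squarelotron, ring):
--     """Performs the Left-Right Flip of the squarelotron."""
--     l_r_s = deepcopy(squarelotron)
--     if (ring == 'outer'):
--         for row in range(5):
--             l_r_s[row][0], l_r_s[row][4] = l_r_s[row][4], l_r_s[row][0]
--         l_r_s[0][1], l_r_s[0][3] = l_r_s[0][3], l_r_s[0][1]
--         l_r_s[4][1], l_r_s[4][3] = l_r_s[4][3], l_r_s[4][1]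
--     if (ring == 'inner'):
--         for row in range(1, 4):
--             l_r_s[row][1], l_r_s[row][3] = l_r_s[row][3], l_r_s[row][1]
--     return l_r_s
-- ===== SOURCE B (Python) =====
-- def left_right_flip(squarelotron, ring):
--     """Performs the Left-Right Flip of the squarelotron."""
--     def mirrored(r, c):
--         if ring == 'outer':
--             return (r in (0, 4) and c <= 4) or (1 <= r <= 3 and c in (0, 4))
--         if ring == 'inner':
--             return 1 <= r <= 3 and c in (1, 3)
--         return False
--     return [[row[4 - c] if mirrored(r, c) else v
--              for c, v in enumerate(row)]
--             for r, row in enumerate(squarelotron)]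
-- ===== Notes on version B (the rewrite author's own statement) =====
-- stated objective: simpler
-- what changed: A deep-copies the grid and performs a fixed sequence of in-place pairwise swaps per ring; B builds the result in one pure nested comprehension, classifying each coordinate with a ring-membership predicate and mirroring ring cells as result[r][c] = original[r][4-c].
import Mathlib
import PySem

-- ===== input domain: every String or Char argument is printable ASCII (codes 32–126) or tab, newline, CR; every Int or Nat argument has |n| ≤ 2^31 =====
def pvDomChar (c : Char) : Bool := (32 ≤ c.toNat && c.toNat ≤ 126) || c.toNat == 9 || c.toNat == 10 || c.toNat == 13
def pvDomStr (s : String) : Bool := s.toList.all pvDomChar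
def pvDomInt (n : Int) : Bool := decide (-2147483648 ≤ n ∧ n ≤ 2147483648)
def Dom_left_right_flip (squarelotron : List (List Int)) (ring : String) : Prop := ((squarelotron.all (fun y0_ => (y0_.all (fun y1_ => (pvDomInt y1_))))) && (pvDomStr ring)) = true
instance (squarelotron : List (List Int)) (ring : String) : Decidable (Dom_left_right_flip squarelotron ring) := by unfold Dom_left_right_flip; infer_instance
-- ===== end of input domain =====

-- B replaces A's sequence of in-place swaps by a single pure comprehension that mirrors
-- each ring cell from the untouched input (objective: simpler). A's Python mutates only
-- its deepcopy, never the argument, so the return value is the whole behaviour.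

-- ===== PORT A =====
-- Python 'l[i], l[j] = l[j], l[i]': RHS read first, then assigned left to right.
-- pySetD/pyGetD are the total forms of Python's indexing; exact here because Pre_ puts
-- every index used in range (outside Pre_ the Python raises IndexError).
def pvSwap2 (row : List Int) (i j : Int) : List Int :=
  PySem.List.pySetD (PySem.List.pySetD row i (PySem.List.pyGetD row j 0)) j
    (PySem.List.pyGetD row i 0)

def pvSwapAt (m : List (List Int)) (r i j : Int) : List (List Int) :=
  PySem.List.pySetD m r (pvSwap2 (PySem.List.pyGetD m r []) i j)

def left_right_flip (squarelotron : List (List Int)) (ring : String) : List (List Int) :=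
  let l := squarelotron
  let l :=
    if ring == "outer" then
      let l := (PySem.List.pyRange 0 5 1).foldl (fun l row => pvSwapAt l row 0 4) l
      let l := pvSwapAt l 0 1 3
      pvSwapAt l 4 1 3
    else l
  if ring == "inner" then
    (PySem.List.pyRange 1 4 1).foldl (fun l row => pvSwapAt l row 1 3) l
  else l

-- ===== PORT B =====
-- Source B's 'mirrored(r, c)' predicate, verbatim.
def pvMirrored (ring : String) (r c : Int) : Bool :=
  if ring == "outer" then
    ((r == 0 || r == 4) && decide (c ≤ 4)) || (decide (1 ≤ r) && decide (r ≤ 3) && (c == 0 || c == 4))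
  else if ring == "inner" then
    decide (1 ≤ r) && decide (r ≤ 3) && (c == 1 || c == 3)
  else false

-- Source B's inner comprehension over one row; row[4-c] is pyGetD, exact because mirrored
-- cells have 4-c in range whenever the Python returns (Pre_).
def pvFlipRow (ring : String) (r : Int) (row : List Int) : List Int :=
  (PySem.List.enumerate row).map (fun cv =>
    if pvMirrored ring r cv.1 then PySem.List.pyGetD row (4 - cv.1) 0 else cv.2)

def left_right_flip_alt (squarelotron : List (List Int)) (ring : String) : List (List Int) :=
  (PySem.List.enumerate squarelotron).map (fun rc => pvFlipRow ring rc.1 rc.2)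

-- ===== PRECONDITION & SPEC =====
-- Exactly the inputs on which the Python A returns: for ring 'outer' it indexes rows
-- 0..4 at columns 0..4, for 'inner' rows 1..3 at columns 1..3; anywhere short of that
-- it raises IndexError. Other rings never index, so no condition there.
def Pre_left_right_flip (squarelotron : List (List Int)) (ring : String) : Prop :=
  (ring = "outer" → 5 ≤ squarelotron.length ∧ ∀ i < 5, 5 ≤ (squarelotron.getD i []).length) ∧
  (ring = "inner" → 4 ≤ squarelotron.length ∧ ∀ i < 4, 1 ≤ i → 4 ≤ (squarelotron.getD i []).length)

instance (squarelotron : List (List Int)) (ring : String) : Decidable (Pre_left_right_flip squarelotron ring) := by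
  unfold Pre_left_right_flip; infer_instance

def pvWitness_left_right_flip : List (List Int) × String :=
  ([[1,2,3,4,5],[6,7,8,9,10],[11,12,13,14,15],[16,17,18,19,20],[21,22,23,24,25]], "outer")

def Spec_left_right_flip (squarelotron : List (List Int)) (ring : String) (out : List (List Int)) : Prop := out = left_right_flip_alt squarelotron ring
instance (squarelotron : List (List Int)) (ring : String) (out : List (List Int)) : Decidable (Spec_left_right_flip squarelotron ring out) := by unfold Spec_left_right_flip; infer_instance

-- ===== CLAIM (what is proved, stated in full; the proofs are below) =====
def Claim_equal_left_right_flip : Prop := ∀ (squarelotron : List (List Int)) (ring : String), Dom_left_right_flip squarelotron ring → Pre_left_right_flip squarelotron ring → Spec_left_right_flip squarelotron ring (left_right_flip squarelotron ring)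

-- ===== LEMMAS AND PROOFS =====

lemma pvMirrored_false_of_col_ge (ring : String) (r c : Int) (h : 5 ≤ c) :
    pvMirrored ring r c = false := by
  unfold pvMirrored; split_ifs <;> simp <;> omega

lemma pvMirrored_false_of_row_ge (ring : String) (r c : Int) (h : 5 ≤ r) :
    pvMirrored ring r c = false := by
  unfold pvMirrored; split_ifs <;> simp <;> omega

lemma pvMirrored_inner_false_of_col_ge (r c : Int) (h : 4 ≤ c) :
    pvMirrored "inner" r c = false := by
  unfold pvMirrored; simp; omega

lemma pvMirrored_inner_false_of_row (r c : Int) (h : r ≤ 0 ∨ 4 ≤ r) :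
    pvMirrored "inner" r c = false := by
  unfold pvMirrored; simp; omega

lemma pvMirrored_other (ring : String) (r c : Int) (h1 : ring ≠ "outer") (h2 : ring ≠ "inner") :
    pvMirrored ring r c = false := by
  unfold pvMirrored; simp [h1, h2]

lemma pvCellsMapId (ring : String) (r : Int) (orig t : List Int) (s : Int)
    (h : ∀ c, s ≤ c → pvMirrored ring r c = false) :
    (PySem.List.enumerate t s).map (fun cv =>
      if pvMirrored ring r cv.1 then PySem.List.pyGetD orig (4 - cv.1) 0 else cv.2) = t := by
  induction t generalizing s with
  | nil => simp [PySem.List.enumerate_nil]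
  | cons x xs ih =>
      simp [PySem.List.enumerate_cons, h s le_rfl, ih (s + 1) (fun c hc => h c (by omega))]

lemma pvFlipRowId (ring : String) (r : Int) (row : List Int)
    (h : ∀ c, pvMirrored ring r c = false) : pvFlipRow ring r row = row :=
  pvCellsMapId ring r row row 0 (fun c _ => h c)

lemma pvRowsMapId (ring : String) (t : List (List Int)) (s : Int)
    (h : ∀ r c, s ≤ r → pvMirrored ring r c = false) :
    (PySem.List.enumerate t s).map (fun rc => pvFlipRow ring rc.1 rc.2) = t := by
  induction t generalizing s with
  | nil => simp [PySem.List.enumerate_nil]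
  | cons x xs ih =>
      simp [PySem.List.enumerate_cons, pvFlipRowId ring s x (fun c => h s c le_rfl),
        ih (s + 1) (fun r c hr => h r c (by omega))]

lemma pvFlipRow_outer0 (a b c d e : Int) (t : List Int) :
    pvFlipRow "outer" 0 (a::b::c::d::e::t) = e::d::c::b::a::t := by
  unfold pvFlipRow
  simp only [PySem.List.enumerate_cons, List.map_cons]
  norm_num
  rw [pvCellsMapId _ _ _ t 5 (fun c hc => pvMirrored_false_of_col_ge _ _ _ hc)]
  simp [pvMirrored, pysem]

lemma pvFlipRow_outer4 (a b c d e : Int) (t : List Int) :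
    pvFlipRow "outer" 4 (a::b::c::d::e::t) = e::d::c::b::a::t := by
  unfold pvFlipRow
  simp only [PySem.List.enumerate_cons, List.map_cons]
  norm_num
  rw [pvCellsMapId _ _ _ t 5 (fun c hc => pvMirrored_false_of_col_ge _ _ _ hc)]
  simp [pvMirrored, pysem]

lemma pvFlipRow_outer_mid (r : Int) (h1 : 1 ≤ r) (h3 : r ≤ 3) (a b c d e : Int) (t : List Int) :
    pvFlipRow "outer" r (a::b::c::d::e::t) = e::b::c::d::a::t := by
  unfold pvFlipRow
  simp only [PySem.List.enumerate_cons, List.map_cons]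
  norm_num
  rw [pvCellsMapId _ _ _ t 5 (fun c hc => pvMirrored_false_of_col_ge _ _ _ hc)]
  have hr0 : (r == (0:Int)) = false := by simp; omega
  have hr4 : (r == (4:Int)) = false := by simp; omega
  simp [pvMirrored, hr0, hr4, h1, h3, pysem]

lemma pvFlipRow_inner_mid (r : Int) (h1 : 1 ≤ r) (h3 : r ≤ 3) (a b c d : Int) (t : List Int) :
    pvFlipRow "inner" r (a::b::c::d::t) = a::d::c::b::t := by
  unfold pvFlipRow
  simp only [PySem.List.enumerate_cons, List.map_cons]
  norm_num
  rw [pvCellsMapId _ _ _ t 4 (fun c hc => pvMirrored_inner_false_of_col_ge _ _ hc)]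
  simp [pvMirrored, h1, h3, pysem]

lemma pvExistsCons5 {α : Type} (xs : List α) (h : 5 ≤ xs.length) :
    ∃ a b c d e t, xs = a :: b :: c :: d :: e :: t := by
  match xs with
  | a :: b :: c :: d :: e :: t => exact ⟨a, b, c, d, e, t, rfl⟩
  | [] | [_] | [_,_] | [_,_,_] | [_,_,_,_] => simp at h

lemma pvExistsCons4 {α : Type} (xs : List α) (h : 4 ≤ xs.length) :
    ∃ a b c d t, xs = a :: b :: c :: d :: t := by
  match xs with
  | a :: b :: c :: d :: t => exact ⟨a, b, c, d, t, rfl⟩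
  | [] | [_] | [_,_] | [_,_,_] => simp at h

lemma pvSwap2_04 (a b c d e : Int) (t : List Int) :
    pvSwap2 (a::b::c::d::e::t) 0 4 = e::b::c::d::a::t := by
  simp [pvSwap2, pysem, List.set]

lemma pvSwap2_13 (a b c d : Int) (t : List Int) :
    pvSwap2 (a::b::c::d::t) 1 3 = a::d::c::b::t := by
  simp [pvSwap2, pysem, List.set]

lemma pvSwapAt_0 (m0 : List Int) (ms : List (List Int)) (i j : Int) :
    pvSwapAt (m0::ms) 0 i j = pvSwap2 m0 i j :: ms := by
  simp [pvSwapAt, pysem, List.set]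

lemma pvSwapAt_1 (m0 m1 : List Int) (ms : List (List Int)) (i j : Int) :
    pvSwapAt (m0::m1::ms) 1 i j = m0 :: pvSwap2 m1 i j :: ms := by
  simp [pvSwapAt, pysem, List.set]

lemma pvSwapAt_2 (m0 m1 m2 : List Int) (ms : List (List Int)) (i j : Int) :
    pvSwapAt (m0::m1::m2::ms) 2 i j = m0 :: m1 :: pvSwap2 m2 i j :: ms := by
  simp [pvSwapAt, pysem, List.set]

lemma pvSwapAt_3 (m0 m1 m2 m3 : List Int) (ms : List (List Int)) (i j : Int) :
    pvSwapAt (m0::m1::m2::m3::ms) 3 i j = m0 :: m1 :: m2 :: pvSwap2 m3 i j :: ms := by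
  simp [pvSwapAt, pysem, List.set]

lemma pvSwapAt_4 (m0 m1 m2 m3 m4 : List Int) (ms : List (List Int)) (i j : Int) :
    pvSwapAt (m0::m1::m2::m3::m4::ms) 4 i j = m0 :: m1 :: m2 :: m3 :: pvSwap2 m4 i j :: ms := by
  simp [pvSwapAt, pysem, List.set]

lemma pvA_outer (a0 b0 c0 d0 e0 a1 b1 c1 d1 e1 a2 b2 c2 d2 e2 a3 b3 c3 d3 e3 a4 b4 c4 d4 e4 : Int)
    (t0 t1 t2 t3 t4 : List Int) (rest : List (List Int)) :
    left_right_flip ((a0::b0::c0::d0::e0::t0)::(a1::b1::c1::d1::e1::t1)::(a2::b2::c2::d2::e2::t2)::(a3::b3::c3::d3::e3::t3)::(a4::b4::c4::d4::e4::t4)::rest) "outer"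
    = (e0::d0::c0::b0::a0::t0)::(e1::b1::c1::d1::a1::t1)::(e2::b2::c2::d2::a2::t2)::(e3::b3::c3::d3::a3::t3)::(e4::d4::c4::b4::a4::t4)::rest := by
  have hr5 : PySem.List.pyRange 0 5 1 = [(0:Int),1,2,3,4] := by decide
  unfold left_right_flip
  simp only [show (("outer":String) == "outer") = true from by decide,
    show (("outer":String) == "inner") = false from by decide,
    Bool.false_eq_true, if_false, if_true, hr5, List.foldl_cons, List.foldl_nil]
  rw [pvSwapAt_0, pvSwap2_04, pvSwapAt_1, pvSwap2_04, pvSwapAt_2, pvSwap2_04,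
      pvSwapAt_3, pvSwap2_04, pvSwapAt_4, pvSwap2_04,
      pvSwapAt_0, pvSwap2_13, pvSwapAt_4, pvSwap2_13]

lemma pvB_outer (a0 b0 c0 d0 e0 a1 b1 c1 d1 e1 a2 b2 c2 d2 e2 a3 b3 c3 d3 e3 a4 b4 c4 d4 e4 : Int)
    (t0 t1 t2 t3 t4 : List Int) (rest : List (List Int)) :
    left_right_flip_alt ((a0::b0::c0::d0::e0::t0)::(a1::b1::c1::d1::e1::t1)::(a2::b2::c2::d2::e2::t2)::(a3::b3::c3::d3::e3::t3)::(a4::b4::c4::d4::e4::t4)::rest) "outer"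
    = (e0::d0::c0::b0::a0::t0)::(e1::b1::c1::d1::a1::t1)::(e2::b2::c2::d2::a2::t2)::(e3::b3::c3::d3::a3::t3)::(e4::d4::c4::b4::a4::t4)::rest := by
  unfold left_right_flip_alt
  simp only [PySem.List.enumerate_cons, List.map_cons]
  norm_num
  rw [pvRowsMapId _ rest 5 (fun r c hr => pvMirrored_false_of_row_ge _ _ _ hr)]
  rw [pvFlipRow_outer0, pvFlipRow_outer4,
      pvFlipRow_outer_mid 1 (by norm_num) (by norm_num),
      pvFlipRow_outer_mid 2 (by norm_num) (by norm_num),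
      pvFlipRow_outer_mid 3 (by norm_num) (by norm_num)]
  all_goals exact ⟨rfl, rfl, rfl, rfl, rfl, rfl⟩

lemma pvA_inner (a1 b1 c1 d1 a2 b2 c2 d2 a3 b3 c3 d3 : Int)
    (q0 : List Int) (t1 t2 t3 : List Int) (rest : List (List Int)) :
    left_right_flip (q0::(a1::b1::c1::d1::t1)::(a2::b2::c2::d2::t2)::(a3::b3::c3::d3::t3)::rest) "inner"
    = q0::(a1::d1::c1::b1::t1)::(a2::d2::c2::b2::t2)::(a3::d3::c3::b3::t3)::rest := by
  have hr3 : PySem.List.pyRange 1 4 1 = [(1:Int),2,3] := by decide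
  unfold left_right_flip
  simp only [show (("inner":String) == "outer") = false from by decide,
    show (("inner":String) == "inner") = true from by decide,
    Bool.false_eq_true, if_false, if_true, hr3, List.foldl_cons, List.foldl_nil]
  rw [pvSwapAt_1, pvSwap2_13, pvSwapAt_2, pvSwap2_13, pvSwapAt_3, pvSwap2_13]

lemma pvB_inner (a1 b1 c1 d1 a2 b2 c2 d2 a3 b3 c3 d3 : Int)
    (q0 : List Int) (t1 t2 t3 : List Int) (rest : List (List Int)) :
    left_right_flip_alt (q0::(a1::b1::c1::d1::t1)::(a2::b2::c2::d2::t2)::(a3::b3::c3::d3::t3)::rest) "inner"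
    = q0::(a1::d1::c1::b1::t1)::(a2::d2::c2::b2::t2)::(a3::d3::c3::b3::t3)::rest := by
  unfold left_right_flip_alt
  simp only [PySem.List.enumerate_cons, List.map_cons]
  norm_num
  rw [pvRowsMapId _ rest 4 (fun r c hr => pvMirrored_inner_false_of_row _ _ (Or.inr hr))]
  rw [pvFlipRowId _ _ q0 (fun c => pvMirrored_inner_false_of_row _ _ (Or.inl le_rfl)),
      pvFlipRow_inner_mid 1 (by norm_num) (by norm_num),
      pvFlipRow_inner_mid 2 (by norm_num) (by norm_num),
      pvFlipRow_inner_mid 3 (by norm_num) (by norm_num)]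
  all_goals exact ⟨rfl, rfl, rfl, rfl, rfl⟩

-- ===== VERDICT (by name: the statement is the Claim_ definition above) =====
theorem left_right_flip_spec : Claim_equal_left_right_flip := by
  intro sq ring _ hpre
  unfold Spec_left_right_flip
  by_cases hout : ring = "outer"
  · subst hout
    obtain ⟨hlen, hrows⟩ := hpre.1 rfl
    obtain ⟨q0, q1, q2, q3, q4, rest, rfl⟩ := pvExistsCons5 sq hlen
    have h0 := hrows 0 (by norm_num); have h1 := hrows 1 (by norm_num)
    have h2 := hrows 2 (by norm_num); have h3 := hrows 3 (by norm_num)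
    have h4 := hrows 4 (by norm_num)
    simp only [List.getD_cons_zero, List.getD_cons_succ] at h0 h1 h2 h3 h4
    obtain ⟨a0, b0, c0, d0, e0, t0, rfl⟩ := pvExistsCons5 q0 h0
    obtain ⟨a1, b1, c1, d1, e1, t1, rfl⟩ := pvExistsCons5 q1 h1
    obtain ⟨a2, b2, c2, d2, e2, t2, rfl⟩ := pvExistsCons5 q2 h2
    obtain ⟨a3, b3, c3, d3, e3, t3, rfl⟩ := pvExistsCons5 q3 h3
    obtain ⟨a4, b4, c4, d4, e4, t4, rfl⟩ := pvExistsCons5 q4 h4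
    rw [pvA_outer, pvB_outer]
  · by_cases hin : ring = "inner"
    · subst hin
      obtain ⟨hlen, hrows⟩ := hpre.2 rfl
      obtain ⟨q0, q1, q2, q3, rest, rfl⟩ := pvExistsCons4 sq hlen
      have h1 := hrows 1 (by norm_num) (by norm_num)
      have h2 := hrows 2 (by norm_num) (by norm_num)
      have h3 := hrows 3 (by norm_num) (by norm_num)
      simp only [List.getD_cons_zero, List.getD_cons_succ] at h1 h2 h3
      obtain ⟨a1, b1, c1, d1, t1, rfl⟩ := pvExistsCons4 q1 h1
      obtain ⟨a2, b2, c2, d2, t2, rfl⟩ := pvExistsCons4 q2 h2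
      obtain ⟨a3, b3, c3, d3, t3, rfl⟩ := pvExistsCons4 q3 h3
      rw [pvA_inner, pvB_inner]
    · unfold left_right_flip left_right_flip_alt
      rw [pvRowsMapId _ sq 0 (fun r c _ => pvMirrored_other _ _ _ hout hin)]
      simp [hout, hin]
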